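-- pv_equiv track=rewrite | github.com/dave5801/space-rocks | space_rocks/data/filter_data.py | filter_orbital_data
-- ===== SOURCE A (Python) =====
-- def filter_orbital_data(data):
--     data_in = data[1]
--     data_out = {}
--     required = ['aphelion_distance', 'jupiter_tisserand_invariant', 'orbit_id', 'name']
--     for item in data_in:
--         if data_in[item] == '':
--             del data[item]
--         if item in required:
--             data_out[item] = data_in[item]
--     return data_out
-- ===== SOURCE B (Python) =====
-- REQUIRED = frozenset(['aphelion_distance', 'jupiter_tisserand_invariant',
--                       'orbit_id', 'name'])
--
--
-- def filter_orbital_data(data):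
--     data_in = data[1]
--     return {k: v for k, v in data_in.items() if k in REQUIRED}
-- ===== Notes on version B (the rewrite author's own statement) =====
-- stated objective: simpler
-- what changed: B replaces A's stateful loop (per-key dict lookups, a dead 'del data[item]' mutation branch that can only raise TypeError, and list-membership tests) by a single pure items() comprehension filtered through a frozenset; Pre_ excludes the inputs on which A raises (fewer than 2 elements, or an empty-string value in data[1], where 'del data[item]' is a TypeError on the outer list).
import Mathlib
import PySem

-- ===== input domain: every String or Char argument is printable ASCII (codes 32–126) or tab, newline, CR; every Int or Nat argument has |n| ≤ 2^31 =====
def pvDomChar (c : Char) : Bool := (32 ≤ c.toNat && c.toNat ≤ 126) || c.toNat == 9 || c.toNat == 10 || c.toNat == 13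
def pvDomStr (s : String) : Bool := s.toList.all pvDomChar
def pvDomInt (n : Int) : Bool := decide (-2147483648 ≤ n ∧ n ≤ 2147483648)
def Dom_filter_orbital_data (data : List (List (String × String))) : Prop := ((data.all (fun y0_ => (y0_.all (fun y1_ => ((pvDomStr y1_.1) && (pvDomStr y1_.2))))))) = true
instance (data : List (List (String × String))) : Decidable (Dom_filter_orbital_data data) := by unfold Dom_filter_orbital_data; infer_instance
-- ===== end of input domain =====

-- B replaces A's stateful loop (with its dead 'del' branch that can only raise TypeError)
-- by a single pure filter of data[1]'s items through the required-key set; A = B wherever A returns.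


-- ===== PORT A =====
def requiredA : List String :=
  ["aphelion_distance", "jupiter_tisserand_invariant", "orbit_id", "name"]

-- the 'for item in data_in' loop of A: none = the TypeError raised by 'del data[item]'
def loopA (d : PySem.Dict String String) (ks : List String)
    (out : PySem.Dict String String) : Option (PySem.Dict String String) :=
  match ks with
  | [] => some out
  | k :: rest =>
    if d.getD k "" == "" then none
    else if requiredA.contains k then loopA d rest (out.insert k (d.getD k ""))
    else loopA d rest out

def filter_orbital_data (data : List (List (String × String))) : List (String × String) :=
  match PySem.List.pyGet? data 1 with          -- data[1] (IndexError → excluded by Pre_)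
  | none => []
  | some pairs =>
    let d := PySem.Dict.ofList pairs           -- the Python dict data[1]
    match loopA d d.keys PySem.Dict.empty with
    | none => []                               -- TypeError path, excluded by Pre_
    | some out => out.items

-- ===== PORT B =====
def requiredB : PySem.Set String :=
  PySem.Set.ofList ["aphelion_distance", "jupiter_tisserand_invariant", "orbit_id", "name"]

def filter_orbital_data_alt (data : List (List (String × String))) : List (String × String) :=
  match PySem.List.pyGet? data 1 with
  | none => []
  | some pairs =>
    (PySem.Dict.ofList pairs).items.filter (fun kv => PySem.Set.contains requiredB kv.1)

-- ===== PRECONDITION & SPEC =====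
-- Pre_ excludes exactly the inputs on which A raises: fewer than 2 elements (IndexError on
-- data[1]) or an empty-string value in the dict data[1] ('del data[item]' is a TypeError).
def Pre_filter_orbital_data (data : List (List (String × String))) : Prop :=
  2 ≤ data.length ∧ "" ∉ (PySem.Dict.ofList (data.getD 1 [])).values
instance (data : List (List (String × String))) : Decidable (Pre_filter_orbital_data data) := by
  unfold Pre_filter_orbital_data; infer_instance

def pvWitness_filter_orbital_data : (List (List (String × String))) :=
  [[], [("name", "Eros"), ("q", "1"), ("orbit_id", "17")]]

def Spec_filter_orbital_data (data : List (List (String × String))) (out : List (String × String)) : Prop := out = filter_orbital_data_alt data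
instance (data : List (List (String × String))) (out : List (String × String)) : Decidable (Spec_filter_orbital_data data out) := by unfold Spec_filter_orbital_data; infer_instance

-- ===== CLAIM (what is proved, stated in full; the proofs are below) =====
def Claim_equal_filter_orbital_data : Prop := ∀ (data : List (List (String × String))), Dom_filter_orbital_data data → Pre_filter_orbital_data data → Spec_filter_orbital_data data (filter_orbital_data data)

-- ===== LEMMAS AND PROOFS =====

-- A's loop over distinct keys (all present in d with non-empty values, all fresh in out)
-- returns 'some' and appends the required pairs in key order.
lemma loopA_spec (d : PySem.Dict String String)
    (ks : List String) (out : PySem.Dict String String)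
    (hsub : ∀ k ∈ ks, k ∈ d.keys) (hnd : ks.Nodup)
    (hval : ∀ k ∈ ks, d.getD k "" ≠ "")
    (hfresh : ∀ k ∈ ks, out.contains k = false) :
    ∃ r, loopA d ks out = some r ∧
      r.items = out.items ++ (ks.filter (fun k => requiredA.contains k)).map
        (fun k => (k, d.getD k "")) := by
  induction ks generalizing out with
  | nil => exact ⟨out, rfl, by simp⟩
  | cons k rest ih =>
    have hvk : d.getD k "" ≠ "" := hval k (by simp)
    have hne : (d.getD k "" == "") = false := beq_eq_false_iff_ne.mpr hvk
    have hsub' : ∀ k' ∈ rest, k' ∈ d.keys := fun k' h => hsub k' (by simp [h])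
    have hnd' : rest.Nodup := hnd.of_cons
    have hval' : ∀ k' ∈ rest, d.getD k' "" ≠ "" := fun k' h => hval k' (by simp [h])
    have hkrest : k ∉ rest := (List.nodup_cons.mp hnd).1
    by_cases hreq : k ∈ requiredA
    · have hfresh' : ∀ k' ∈ rest, (out.insert k (d.getD k "")).contains k' = false := by
        intro k' h
        rw [PySem.Dict.contains_insert]
        have : k' ≠ k := fun he => hkrest (he ▸ h)
        simp [this, hfresh k' (by simp [h])]
      obtain ⟨r, hr, hitems⟩ := ih (out.insert k (d.getD k "")) hsub' hnd' hval' hfresh'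
      refine ⟨r, ?_, ?_⟩
      · simp [loopA, hne, hreq, hr]
      · rw [hitems, PySem.Dict.items_insert, if_neg (by simp [hfresh k (by simp)])]
        simp [hreq]
    · obtain ⟨r, hr, hitems⟩ := ih out hsub' hnd' hval'
        (fun k' h => hfresh k' (by simp [h]))
      refine ⟨r, ?_, ?_⟩
      · simp [loopA, hne, hreq, hr]
      · rw [hitems]; simp [hreq]

lemma pyGet?_two (a b : List (String × String)) (t : List (List (String × String))) :
    PySem.List.pyGet? (a :: b :: t) 1 = some b := by
  simp [PySem.List.pyGet?, PySem.List.pyIdx?]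

theorem filter_orbital_data_spec : Claim_equal_filter_orbital_data := by
  intro data _ hpre
  unfold Spec_filter_orbital_data
  obtain ⟨hlen, hval⟩ := hpre
  match data with
  | [] => simp at hlen
  | [_] => simp at hlen
  | a :: b :: t =>
    have hb : (a :: b :: t).getD 1 [] = b := rfl
    rw [hb] at hval
    unfold filter_orbital_data filter_orbital_data_alt
    rw [pyGet?_two]
    show (match loopA (PySem.Dict.ofList b) (PySem.Dict.ofList b).keys PySem.Dict.empty with
          | none => []
          | some out => out.items) =
        List.filter (fun kv => PySem.Set.contains requiredB kv.1) (PySem.Dict.ofList b).items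
    set d := PySem.Dict.ofList b with hd
    have hnd : d.keys.Nodup := PySem.Dict.nodup_keys_ofList b
    have hvals : d.values = d.keys.map (fun k => d.getD k "") :=
      PySem.Dict.values_eq_map_keys d hnd ""
    have hval' : ∀ k ∈ d.keys, d.getD k "" ≠ "" := by
      intro k hk he
      exact hval (by rw [hvals]; exact List.mem_map.mpr ⟨k, hk, he⟩)
    obtain ⟨r, hr, hitems⟩ := loopA_spec d d.keys PySem.Dict.empty
      (fun _ h => h) hnd hval' (fun k _ => PySem.Dict.contains_empty k)
    rw [hr]
    show r.items = List.filter (fun kv => PySem.Set.contains requiredB kv.1) d.items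
    have hemp : (PySem.Dict.empty : PySem.Dict String String).items = [] := rfl
    rw [hitems, hemp, List.nil_append, PySem.Dict.items_eq_map_keys d hnd "", List.filter_map]
    congr 1
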